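-- pv_equiv track=rewrite | github.com/AlexFreemann/Examples | EtsyToRem.py | theme_find
-- ===== SOURCE A (Python) =====
-- def theme_find(title):
--     title = title.lower().split(' ')[0:3]
--     words = ["phone", "iphone", "samsung", "case", "pad", "mouse", "11", "pro", "max", "9x7", "galaxy", "passport",
--              "cover", "mug", "oz", "case"]
--     for word in words:
--         try:
--             title.remove(word)
--         except:
--             continue
--     theme = ""
--     for i in title:
--         i += " "
--         theme += i
--     return theme
-- ===== SOURCE B (Python) =====
-- def theme_find(title):
--     words = ["phone", "iphone", "samsung", "case", "pad", "mouse", "11", "pro", "max", "9x7", "galaxy", "passport",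
--              "cover", "mug", "oz", "case"]
--     quota = {}
--     for w in words:
--         quota[w] = quota.get(w, 0) + 1
--     kept = []
--     for x in title.lower().split(' ')[0:3]:
--         if quota.get(x, 0) > 0:
--             quota[x] -= 1
--         else:
--             kept.append(x)
--     return "".join(x + " " for x in kept)
-- ===== Notes on version B (the rewrite author's own statement) =====
-- stated objective: simpler
-- what changed: B builds a quota dict from the keyword list once and does a single pass over the (at most 3) title words, keeping a word when its quota is exhausted, instead of A's 16 try/except list.remove passes mutating the title list.
import Mathlib
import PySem

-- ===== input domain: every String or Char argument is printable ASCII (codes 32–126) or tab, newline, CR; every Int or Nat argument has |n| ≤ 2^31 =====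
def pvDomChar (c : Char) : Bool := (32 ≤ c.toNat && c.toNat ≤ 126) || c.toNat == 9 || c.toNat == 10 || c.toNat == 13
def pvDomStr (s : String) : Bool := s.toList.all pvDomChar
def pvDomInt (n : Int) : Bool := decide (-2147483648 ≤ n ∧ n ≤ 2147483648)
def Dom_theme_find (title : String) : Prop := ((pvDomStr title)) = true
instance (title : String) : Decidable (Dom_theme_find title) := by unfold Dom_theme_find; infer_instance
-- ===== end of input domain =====

-- B replaces A's 16 destructive list.remove passes by one quota dict and a single pass
-- over the (at most 3) title words; objective: simpler/idiomatic, return value only.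

-- ===== PORT A =====
-- the keyword list of A ("case" appears twice, so it can be removed twice)
def pvWordsA : List String :=
  ["phone", "iphone", "samsung", "case", "pad", "mouse", "11", "pro", "max", "9x7",
   "galaxy", "passport", "cover", "mug", "oz", "case"]

def theme_find (title : String) : String :=
  -- title = title.lower().split(' ')[0:3]
  let t : List String :=
    PySem.List.slice ((PySem.Str.split? (PySem.Str.lower title) " ").getD []) (some 0) (some 3)
  -- for word in words: try: title.remove(word) except: continue
  let t := pvWordsA.foldl
    (fun t w => match PySem.List.remove? t w with
      | some t' => t'
      | none => t) t
  -- theme = ""; for i in title: i += " "; theme += i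
  t.foldl (fun theme i => theme ++ (i ++ " ")) ""

-- ===== PORT B =====
def pvWordsB : List String :=
  ["phone", "iphone", "samsung", "case", "pad", "mouse", "11", "pro", "max", "9x7",
   "galaxy", "passport", "cover", "mug", "oz", "case"]

def theme_find_alt (title : String) : String :=
  -- quota = {}; for w in words: quota[w] = quota.get(w, 0) + 1
  let quota : PySem.Dict String Int :=
    pvWordsB.foldl (fun d w => d.insert w (d.getD w 0 + 1)) PySem.Dict.empty
  -- kept = []; for x in title.lower().split(' ')[0:3]: …
  let st :=
    (PySem.List.slice ((PySem.Str.split? (PySem.Str.lower title) " ").getD []) (some 0) (some 3)).foldl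
      (fun (st : PySem.Dict String Int × List String) x =>
        if st.1.getD x 0 > 0 then (st.1.insert x (st.1.getD x 0 - 1), st.2)
        else (st.1, st.2 ++ [x]))
      (quota, [])
  -- return "".join(x + " " for x in kept)
  PySem.Str.join "" (st.2.map (fun x => x ++ " "))

-- ===== PRECONDITION & SPEC =====
def Spec_theme_find (title : String) (out : String) : Prop := out = theme_find_alt title
instance (title : String) (out : String) : Decidable (Spec_theme_find title out) := by unfold Spec_theme_find; infer_instance

-- ===== CLAIM (what is proved, stated in full; the proofs are below) =====
def Claim_equal_theme_find : Prop := ∀ (title : String), Dom_theme_find title → Spec_theme_find title (theme_find title)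

-- ===== LEMMAS AND PROOFS =====

-- counter update helpers
def pvDec (c : String → Int) (x : String) : String → Int := fun y => if y = x then c x - 1 else c y
def pvInc (c : String → Int) (w : String) : String → Int := fun y => if y = w then c y + 1 else c y

-- abstract quota-filter: drop each word while its counter is positive, decrementing
def pvFC (c : String → Int) : List String → List String
  | [] => []
  | x :: t => if c x > 0 then pvFC (pvDec c x) t else x :: pvFC c t

theorem pvFC_cons (c : String → Int) (x : String) (t : List String) :
    pvFC c (x :: t) = if c x > 0 then pvFC (pvDec c x) t else x :: pvFC c t := rfl

theorem pvDec_pvInc_self (c : String → Int) (x : String) : pvDec (pvInc c x) x = c := by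
  funext y; by_cases hy : y = x <;> simp [pvDec, pvInc, hy]

theorem pvDec_pvInc_comm (c : String → Int) (x w : String) (hxw : x ≠ w) :
    pvDec (pvInc c w) x = pvInc (pvDec c x) w := by
  funext y
  by_cases hy : y = x
  · subst hy; simp [pvDec, pvInc, hxw]
  · by_cases hyw : y = w <;> simp [pvDec, pvInc, hy, hyw, Ne.symm hxw]

-- a nonpositive counter filters nothing
theorem pvFC_nonpos (t : List String) (c : String → Int) (h : ∀ y, c y ≤ 0) :
    pvFC c t = t := by
  induction t generalizing c with
  | nil => rfl
  | cons x t ih =>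
    rw [pvFC_cons, if_neg (by have := h x; omega)]
    exact congrArg (x :: ·) (ih c h)

-- bumping the counter at w = filtering after removing the first occurrence of w
theorem pvFC_bump (t : List String) (c : String → Int) (w : String) (hc : ∀ y, 0 ≤ c y) :
    pvFC (pvInc c w) t = pvFC c ((PySem.List.remove? t w).getD t) := by
  induction t generalizing c with
  | nil => rfl
  | cons x t ih =>
    by_cases hxw : x = w
    · subst hxw
      rw [PySem.List.remove?_cons_self, Option.getD_some, pvFC_cons,
        if_pos (by have := hc x; simp [pvInc]; omega), pvDec_pvInc_self]
    · rw [PySem.List.remove?_cons_of_ne t hxw]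
      have hcx : pvInc c w x = c x := by simp [pvInc, hxw]
      cases hrem : PySem.List.remove? t w with
      | none =>
        simp only [Option.map_none, Option.getD_none]
        rw [pvFC_cons, pvFC_cons, hcx]
        by_cases hx : c x > 0
        · rw [if_pos hx, if_pos hx, pvDec_pvInc_comm c x w hxw]
          have := ih (pvDec c x) (by intro y; by_cases hy : y = x <;> simp [pvDec, hy] <;> [omega; exact hc y])
          rw [hrem, Option.getD_none] at this
          exact this
        · rw [if_neg hx, if_neg hx]
          have := ih c hc
          rw [hrem, Option.getD_none] at this
          rw [this]
      | some t' =>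
        simp only [Option.map_some, Option.getD_some]
        rw [pvFC_cons, pvFC_cons, hcx]
        by_cases hx : c x > 0
        · rw [if_pos hx, if_pos hx, pvDec_pvInc_comm c x w hxw]
          have := ih (pvDec c x) (by intro y; by_cases hy : y = x <;> simp [pvDec, hy] <;> [omega; exact hc y])
          rw [hrem, Option.getD_some] at this
          exact this
        · rw [if_neg hx, if_neg hx]
          have := ih c hc
          rw [hrem, Option.getD_some] at this
          rw [this]

-- A's remove loop = the quota filter with the keyword multiset counts
theorem pvA_loop (ws : List String) (t : List String) :
    ws.foldl (fun t w => match PySem.List.remove? t w with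
      | some t' => t'
      | none => t) t
    = pvFC (fun y => (ws.count y : Int)) t := by
  induction ws generalizing t with
  | nil =>
    simp only [List.foldl_nil]
    exact (pvFC_nonpos t _ (by intro y; simp)).symm
  | cons w ws ih =>
    simp only [List.foldl_cons]
    have step : (match PySem.List.remove? t w with
        | some t' => t'
        | none => t) = (PySem.List.remove? t w).getD t := by
      cases PySem.List.remove? t w <;> rfl
    rw [step, ih, ← pvFC_bump _ _ w (by intro y; positivity)]
    congr 1
    funext y
    by_cases hy : y = w
    · subst hy; simp [pvInc]
    · have hwy : ¬ w = y := fun h => hy h.symm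
      simp [pvInc, hy, hwy]

-- B's fold over the title words = kept-so-far ++ the quota filter
theorem pvB_loop (t : List String) (d : PySem.Dict String Int) (kept : List String) :
    (t.foldl (fun (st : PySem.Dict String Int × List String) x =>
        if st.1.getD x 0 > 0 then (st.1.insert x (st.1.getD x 0 - 1), st.2)
        else (st.1, st.2 ++ [x])) (d, kept)).2
    = kept ++ pvFC (fun y => d.getD y 0) t := by
  induction t generalizing d kept with
  | nil => simp [pvFC]
  | cons x t ih =>
    simp only [List.foldl_cons]
    rw [pvFC_cons]
    by_cases hx : d.getD x 0 > 0
    · rw [if_pos hx, if_pos hx, ih]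
      congr 1
      have : (fun y => (d.insert x (d.getD x 0 - 1)).getD y 0)
           = pvDec (fun y => d.getD y 0) x := by
        funext y
        rw [PySem.Dict.getD_insert]
        by_cases hy : y = x <;> simp [pvDec, hy]
      rw [this]
    · rw [if_neg hx, if_neg hx, ih]
      simp

-- "".join concatenates
theorem pvJoin_nil_sep (ps : List (List Char)) :
    PySem.Chars.join [] ps = ps.flatten := by
  induction ps with
  | nil => simp [PySem.Chars.join_nil]
  | cons p rest ih =>
    cases rest with
    | nil => simp [PySem.Chars.join_singleton]
    | cons q rs =>
      rw [PySem.Chars.join_cons_cons]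
      simp only [List.flatten_cons] at ih ⊢
      rw [ih]
      simp

-- joining: A's string accumulator fold = "".join of the words with trailing spaces
theorem pv_join (l : List String) (s : String) :
    l.foldl (fun theme i => theme ++ (i ++ " ")) s
    = s ++ PySem.Str.join "" (l.map (fun x => x ++ " ")) := by
  induction l generalizing s with
  | nil =>
    apply String.toList_inj.mp
    simp [PySem.Str.toList_join, PySem.Chars.join_nil]
  | cons x l ih =>
    simp only [List.foldl_cons]
    rw [ih]
    apply String.toList_inj.mp
    simp [PySem.Str.toList_join, pvJoin_nil_sep]

-- ===== VERDICT (by name: the statement is the Claim_ definition above) =====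
theorem theme_find_spec : Claim_equal_theme_find := by
  intro title _
  unfold Spec_theme_find theme_find theme_find_alt
  simp only []
  rw [pvB_loop, pvA_loop, pv_join]
  rw [PySem.Dict.foldl_insert_getD_add_one_eq_counter]
  have hcnt : (fun y => (PySem.Dict.counter pvWordsB).getD y 0)
       = (fun y => (pvWordsA.count y : Int)) := by
    funext y
    rw [PySem.Dict.getD_counter]
    rw [show pvWordsB = pvWordsA from rfl]
  rw [hcnt]
  apply String.toList_inj.mp
  simp [PySem.Str.toList_join]
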